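-- pv_equiv track=rewrite | github.com/MericD/Bitcoin-Transaction-Parser | Diagram/hex_converting.py | is_text
-- ===== SOURCE A (Python) =====
-- def is_text(bin_dec):
--     sub = ('bitc0in','est','usd','USD','uds','script','bitcamp','_SUCKS','NVBT','Satoshi','d-r1',
--         's-r1', '!','"','#', '$', '%', '&','*','-','==','&','(',')','.', 'undefined', 'lol', 'tt2',
--         'PropertyProtected', 'data', '_', 'link', '?', '|', 'KC{','tt3', 'Bitcoin over capacity')
--     if any(i in bin_dec for i in sub):
--         return True
--     elif (len(bin_dec) ==1) and (' ' in bin_dec):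
--         return True
--     else:
--         return False
-- ===== SOURCE B (Python) =====
-- # one-level trie: markers grouped by first character; single scan of the input,
-- # each position consults only the tails filed under its character
-- _SUB = ('bitc0in','est','usd','USD','uds','script','bitcamp','_SUCKS','NVBT','Satoshi','d-r1',
--     's-r1', '!','"','#', '$', '%', '&','*','-','==','&','(',')','.', 'undefined', 'lol', 'tt2',
--     'PropertyProtected', 'data', '_', 'link', '?', '|', 'KC{','tt3', 'Bitcoin over capacity')
--
-- _TAILS = {}
-- for _m in _SUB:
--     _TAILS.setdefault(_m[0], []).append(_m[1:])
--
-- def is_text(bin_dec):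
--     for i, c in enumerate(bin_dec):
--         for tail in _TAILS.get(c, ()):
--             if bin_dec.startswith(tail, i + 1):
--                 return True
--     return bin_dec == ' '
-- ===== Notes on version B (the rewrite author's own statement) =====
-- stated objective: alternative
-- what changed: Replaced the 37 independent per-marker substring scans (one full pass over bin_dec per marker) by a one-level trie: a dict mapping each marker's first character to the list of its tails, consulted once per position of a single left-to-right scan (startswith on the tail only where the first character matches); the single-space branch becomes a direct equality test.
import Mathlib
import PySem

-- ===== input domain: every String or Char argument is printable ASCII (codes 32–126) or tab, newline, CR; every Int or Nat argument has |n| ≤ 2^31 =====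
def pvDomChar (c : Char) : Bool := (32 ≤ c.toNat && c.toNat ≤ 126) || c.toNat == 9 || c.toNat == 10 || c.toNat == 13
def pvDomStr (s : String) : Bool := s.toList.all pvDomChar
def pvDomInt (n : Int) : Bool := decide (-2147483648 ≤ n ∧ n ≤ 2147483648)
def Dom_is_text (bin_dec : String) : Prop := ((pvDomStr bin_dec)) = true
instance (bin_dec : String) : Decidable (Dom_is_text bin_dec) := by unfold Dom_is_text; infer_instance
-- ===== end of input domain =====

-- B replaces the 37 independent per-marker substring scans by a one-level trie (markers grouped by
-- first character) consulted once per position of a single left-to-right scan; same boolean result (alternative).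


-- ===== PORT A =====
-- the marker tuple 'sub' of A
def pvMarkers : List String :=
  ["bitc0in","est","usd","USD","uds","script","bitcamp","_SUCKS","NVBT","Satoshi","d-r1",
   "s-r1", "!","\"","#", "$", "%", "&","*","-","==","&","(",")",".", "undefined", "lol", "tt2",
   "PropertyProtected", "data", "_", "link", "?", "|", "KC{","tt3", "Bitcoin over capacity"]

def is_text (bin_dec : String) : Bool :=
  if pvMarkers.any (fun i => PySem.Str.isIn i bin_dec) then
    true
  else if PySem.Str.len bin_dec == 1 && PySem.Str.isIn " " bin_dec then
    true
  else
    false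

-- ===== PORT B =====
-- _TAILS: the module-level dict built from _SUB by the setdefault loop, ported as its literal value
def pvTails : PySem.Dict Char (List String) :=
  PySem.Dict.mk
    [('b', ["itc0in", "itcamp"]), ('e', ["st"]), ('u', ["sd", "ds", "ndefined"]), ('U', ["SD"]),
     ('s', ["cript", "-r1"]), ('_', ["SUCKS", ""]), ('N', ["VBT"]), ('S', ["atoshi"]),
     ('d', ["-r1", "ata"]), ('!', [""]), ('"', [""]), ('#', [""]), ('$', [""]), ('%', [""]),
     ('&', ["", ""]), ('*', [""]), ('-', [""]), ('=', ["="]), ('(', [""]), (')', [""]),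
     ('.', [""]), ('l', ["ol", "ink"]), ('t', ["t2", "t3"]), ('P', ["ropertyProtected"]),
     ('?', [""]), ('|', [""]), ('K', ["C{"]), ('B', ["itcoin over capacity"])]

-- the for loop over (i, c) with early return; bin_dec.startswith(tail, i+1) is
-- 'tail is a prefix of the characters after position i', i.e. of rest
def scanTails : List Char → Bool
  | [] => false
  | c :: rest =>
      if (PySem.Dict.getD pvTails c []).any (fun t => PySem.Chars.startswith rest t.toList) then
        true
      else
        scanTails rest

def is_text_alt (bin_dec : String) : Bool :=
  if scanTails bin_dec.toList then true
  else bin_dec.toList == [' ']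

-- ===== PRECONDITION & SPEC =====
def Spec_is_text (bin_dec : String) (out : Bool) : Prop := out = is_text_alt bin_dec
instance (bin_dec : String) (out : Bool) : Decidable (Spec_is_text bin_dec out) := by unfold Spec_is_text; infer_instance

-- ===== CLAIM (what is proved, stated in full; the proofs are below) =====
def Claim_equal_is_text : Prop := ∀ (bin_dec : String), Dom_is_text bin_dec → Spec_is_text bin_dec (is_text bin_dec)

-- ===== LEMMAS AND PROOFS =====

-- every marker decomposes as first char :: tail with the tail filed under that char in pvTails
theorem markers_in_tails :
    pvMarkers.all (fun m =>
      match m.toList with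
      | [] => false
      | c :: _ =>
          (PySem.Dict.getD pvTails c []).any (fun t => m.toList == c :: t.toList)) = true := rfl

-- every entry of pvTails reassembles to a marker
theorem tails_in_markers :
    pvTails.items.all (fun p =>
      p.2.all (fun t => pvMarkers.any (fun m => m.toList == p.1 :: t.toList))) = true := rfl

-- a dict lookup result comes from some entry of the underlying items list
theorem mem_getD_items {ν : Type} {l : List (Char × List ν)} {c : Char} {t : ν}
    (h : t ∈ PySem.Dict.getD (PySem.Dict.mk l) c []) :
    ∃ p ∈ l, p.1 = c ∧ t ∈ p.2 := by
  induction l with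
  | nil => simp [PySem.Dict.getD, PySem.Dict.get?] at h
  | cons q rest ih =>
      rw [PySem.Dict.getD_eq_get?_getD, PySem.Dict.get?_mk_cons] at h
      by_cases hc : q.1 = c
      · subst hc
        simp only [BEq.rfl, if_pos] at h
        exact ⟨q, List.mem_cons_self, rfl, h⟩
      · rw [if_neg (by simpa using hc), ← PySem.Dict.getD_eq_get?_getD] at h
        obtain ⟨p, hp, h1, h2⟩ := ih h
        exact ⟨p, List.mem_cons_of_mem _ hp, h1, h2⟩

-- the per-position equivalence: the tails filed under c match at (c :: rest) iff some marker is a prefix there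
theorem pos_iff (c : Char) (rest : List Char) :
    ((PySem.Dict.getD pvTails c []).any (fun t => PySem.Chars.startswith rest t.toList)) = true
      ↔ ∃ m ∈ pvMarkers, m.toList <+: (c :: rest) := by
  constructor
  · intro h
    obtain ⟨t, ht, hsw⟩ := List.any_eq_true.mp h
    obtain ⟨p, hp, hp1, hp2⟩ := mem_getD_items ht
    have := List.all_eq_true.mp tails_in_markers p hp
    obtain ⟨m, hm, hme⟩ := List.any_eq_true.mp (List.all_eq_true.mp this t hp2)
    refine ⟨m, hm, ?_⟩
    rw [eq_of_beq hme, hp1]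
    exact List.cons_prefix_cons.mpr ⟨rfl, (PySem.Chars.startswith_iff _ _).mp hsw⟩
  · rintro ⟨m, hm, hpre⟩
    have hfact := List.all_eq_true.mp markers_in_tails m hm
    cases hml : m.toList with
    | nil => rw [hml] at hfact; simp at hfact
    | cons c0 mt =>
        rw [hml] at hfact hpre
        obtain ⟨rfl, hpre'⟩ := List.cons_prefix_cons.mp hpre
        refine List.any_eq_true.mpr ?_
        obtain ⟨t, ht, hte⟩ := List.any_eq_true.mp hfact
        have : c0 :: mt = c0 :: t.toList := by simpa [hml] using eq_of_beq hte
        refine ⟨t, ht, (PySem.Chars.startswith_iff _ _).mpr ?_⟩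
        rw [← List.cons_injective.eq_iff.mp this]
        exact hpre'

theorem scanTails_iff (s : List Char) :
    scanTails s = true ↔ ∃ m ∈ pvMarkers, m.toList <:+: s := by
  induction s with
  | nil =>
      simp only [scanTails]
      constructor
      · intro h; exact absurd h (by simp)
      · rintro ⟨m, hm, hi⟩
        have hfact := List.all_eq_true.mp markers_in_tails m hm
        cases hml : m.toList with
        | nil => rw [hml] at hfact; simp at hfact
        | cons c0 t =>
            rw [hml] at hi
            exact absurd (List.eq_nil_of_infix_nil hi) (by simp)
  | cons c rest ih =>
      simp only [scanTails]
      split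
      · rename_i h
        simp only [true_iff]
        obtain ⟨m, hm, hpre⟩ := (pos_iff c rest).mp h
        exact ⟨m, hm, hpre.isInfix⟩
      · rename_i h
        rw [ih]
        constructor
        · rintro ⟨m, hm, hi⟩
          exact ⟨m, hm, hi.trans (List.suffix_cons c rest).isInfix⟩
        · rintro ⟨m, hm, hi⟩
          rcases List.infix_cons_iff.mp hi with hp | hi'
          · exact absurd ((pos_iff c rest).mpr ⟨m, hm, hp⟩) (by simpa using h)
          · exact ⟨m, hm, hi'⟩

theorem scan_eq_any (s : String) :
    scanTails s.toList = pvMarkers.any (fun i => PySem.Str.isIn i s) := by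
  rw [Bool.eq_iff_iff, scanTails_iff]
  simp [List.any_eq_true, PySem.Chars.isIn_iff_infix]

theorem single_space_eq (s : String) :
    (PySem.Str.len s == 1 && PySem.Str.isIn " " s) = (s.toList == [' ']) := by
  rw [Bool.eq_iff_iff]
  simp only [Bool.and_eq_true, beq_iff_eq, PySem.Str.len_eq, PySem.Str.isIn_iff_infix]
  constructor
  · rintro ⟨hlen, hin⟩
    match hml : s.toList with
    | [c] =>
        have hsp : (" " : String).toList = [' '] := rfl
        rw [hml, hsp] at hin
        have hmem : ' ' ∈ [c] := hin.subset (by simp)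
        simp at hmem
        rw [hmem]
    | [] => rw [hml] at hlen; simp at hlen
    | c :: d :: t => rw [hml] at hlen; simp at hlen; omega
  · intro h
    rw [h]
    have hsp : (" " : String).toList = [' '] := rfl
    rw [hsp]
    exact ⟨by simp, List.infix_rfl⟩

-- ===== VERDICT (by name: the statement is the Claim_ definition above) =====
theorem is_text_spec : Claim_equal_is_text := by
  intro bin_dec _
  unfold Spec_is_text is_text is_text_alt
  rw [scan_eq_any, single_space_eq]
  split
  · rfl
  · split <;> simp_all
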